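-- pv_equiv track=rewrite | github.com/scolphew/leetcode_python | leetcode/_052_N-QueensII.py | totalNQueens2
-- ===== SOURCE A (Python) =====
-- def totalNQueens2(n):
--     def dfs(row, path, cols, xySum, xyDif, n):
--         result = 0
--         if row == n:
--             return 1
--         for col in range(n):
--             if col not in cols and (row + col) not in xySum and (
--                         row - col) not in xyDif:
--                 cols.add(col)
--                 xySum.add(row + col)
--                 xyDif.add(row - col)
--                 result += dfs(row + 1, path + [col], cols, xySum, xyDif, n)
--                 cols.remove(col)
--                 xySum.remove(row + col)
--                 xyDif.remove(row - col)
--         return result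
--
--     matrix = []
--     res = []
--     return dfs(0, [], set(), set(), set(), n)
-- ===== SOURCE B (Python) =====
-- def totalNQueens2(n):
--     full = (1 << n) - 1 if n > 0 else 0
--
--     def solve(row, cols, dsum, ddif):
--         if row == n:
--             return 1
--         count = 0
--         free = ~(cols | dsum | ddif) & full
--         while free:
--             rest = free & (free - 1)   # clear the lowest set bit
--             p = free ^ rest            # the lowest set bit itself
--             count += solve(row + 1, cols | p, (dsum | p) >> 1, (ddif | p) << 1)
--             free = rest
--         return count
--
--     return solve(0, 0, 0, 0)
-- ===== Notes on version B (the rewrite author's own statement) =====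
-- stated objective: alternative
-- what changed: Replaces the three Python sets (columns, sums, differences) and the per-row scan over range(n) with three bit masks shifted per row; each row builds one free-columns mask and iterates only over its set bits by peeling the lowest set bit.
import Mathlib
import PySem

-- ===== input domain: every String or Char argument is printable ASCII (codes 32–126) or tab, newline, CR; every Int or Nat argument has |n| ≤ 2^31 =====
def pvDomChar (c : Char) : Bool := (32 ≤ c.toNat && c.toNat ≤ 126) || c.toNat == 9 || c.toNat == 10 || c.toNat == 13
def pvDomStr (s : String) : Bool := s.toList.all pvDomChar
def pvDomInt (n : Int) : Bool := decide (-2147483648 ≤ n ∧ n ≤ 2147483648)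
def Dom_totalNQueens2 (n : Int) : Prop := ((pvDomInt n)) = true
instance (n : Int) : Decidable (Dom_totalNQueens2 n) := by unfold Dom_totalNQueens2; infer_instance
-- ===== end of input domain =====

set_option maxHeartbeats 1000000


-- B replaces A's three Python sets and full-row scans by three shifted bit masks and a
-- lowest-set-bit loop over the free columns (count of N-Queens solutions is unchanged).

-- ===== PORT A =====
-- A's dfs; the for-loop over range(n) is the mutually recursive loopA below.
-- fuel is a totality guard only: the entry call passes fuel = n.toNat, which is never
-- exhausted (dfs stops at row == n); at fuel 0 with row ≠ n the loop body is unreachable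
-- in Python (Python's sets are mutated in place, but each add is undone by the matching
-- remove, so passing the updated sets persistently is behaviourally identical).
mutual
def dfsA (fuel : Nat) (row : Int) (path : List Int) (cols xySum xyDif : PySem.Set Int) (n : Int) : Int :=
  if row = n then 1
  else match fuel with
    | 0 => 0
    | fuel + 1 => loopA fuel row path cols xySum xyDif n (PySem.List.pyRange 0 n 1) 0
  termination_by (fuel, 0)

def loopA (fuel : Nat) (row : Int) (path : List Int) (cols xySum xyDif : PySem.Set Int) (n : Int)
    (todo : List Int) (result : Int) : Int :=
  match todo with
  | [] => result
  | col :: rest =>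
    if !cols.contains col && !xySum.contains (row + col) && !xyDif.contains (row - col) then
      let cols1 := cols.add col
      let xySum1 := xySum.add (row + col)
      let xyDif1 := xyDif.add (row - col)
      let result1 := result + dfsA fuel (row + 1) (path ++ [col]) cols1 xySum1 xyDif1 n
      -- cols.remove(col) etc.: always present here, so remove? is always some
      loopA fuel row path ((cols1.remove? col).getD cols1) ((xySum1.remove? (row + col)).getD xySum1)
        ((xyDif1.remove? (row - col)).getD xyDif1) n rest result1
    else loopA fuel row path cols xySum xyDif n rest result
  termination_by (fuel, todo.length + 1)
  decreasing_by all_goals (simp_wf; omega)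
end

-- matrix = [] and res = [] in A are dead locals; the return value is dfs(0, [], set(), set(), set(), n)
def totalNQueens2 (n : Int) : Int :=
  dfsA n.toNat 0 [] PySem.Set.empty PySem.Set.empty PySem.Set.empty n

-- ===== PORT B =====
-- B's solve; the while-loop over the free bits is the mutually recursive bitLoopB below
-- (same fuel totality guard as in port A; entry fuel = n.toNat is never exhausted).
-- free = ~(cols|dsum|ddif) & full is ported as full ^^^ (masks &&& full), exact on Nat masks.
mutual
def dfsB (fuel : Nat) (row : Int) (colsM dsum ddif full : Nat) (n : Int) : Int :=
  if row = n then 1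
  else match fuel with
    | 0 => 0
    | fuel + 1 => bitLoopB fuel row colsM dsum ddif full n (full ^^^ ((colsM ||| dsum ||| ddif) &&& full)) 0
  termination_by (fuel, 0)

def bitLoopB (fuel : Nat) (row : Int) (colsM dsum ddif full : Nat) (n : Int) (free : Nat) (count : Int) : Int :=
  if free = 0 then count
  else
    let rest := free &&& (free - 1)
    let p := free ^^^ rest
    bitLoopB fuel row colsM dsum ddif full n rest
      (count + dfsB fuel (row + 1) (colsM ||| p) ((dsum ||| p) >>> 1) ((ddif ||| p) <<< 1) full n)
  termination_by (fuel, free + 1)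
  decreasing_by
    all_goals (have h1 : free &&& (free - 1) ≤ free - 1 := Nat.and_le_right; omega)
end

def totalNQueens2_alt (n : Int) : Int :=
  let full : Nat := if 0 < n then (1 <<< n.toNat) - 1 else 0
  dfsB n.toNat 0 0 0 0 full n

-- ===== PRECONDITION & SPEC =====
def Spec_totalNQueens2 (n : Int) (out : Int) : Prop := out = totalNQueens2_alt n
instance (n : Int) (out : Int) : Decidable (Spec_totalNQueens2 n out) := by unfold Spec_totalNQueens2; infer_instance

-- ===== CLAIM (what is proved, stated in full; the proofs are below) =====
def Claim_equal_totalNQueens2 : Prop := ∀ (n : Int), Dom_totalNQueens2 n → Spec_totalNQueens2 n (totalNQueens2 n)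

-- ===== LEMMAS AND PROOFS =====

-- Restoring a freshly added absent element gives back the original set.
theorem set_restore {s : PySem.Set Int} {x : Int} (h : x ∉ s) :
    (((s.add x).remove? x).getD (s.add x)) = s := by
  rw [PySem.Set.add_of_not_mem h, PySem.Set.remove?_of_mem (by simp)]
  simp only [Option.getD_some, PySem.Set.discard]
  rw [List.filter_append]
  have hs : List.filter (fun y => !y == x) s = s :=
    List.filter_eq_self.2 (fun a ha => by simp [ne_of_mem_of_not_mem ha h])
  simp [hs]

-- A's loop sums, over the remaining columns, the child counts of the admissible ones.
theorem loopA_eq (fuel : Nat) (row : Int) (path : List Int) (n : Int) :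
    ∀ (todo : List Int) (cols xySum xyDif : PySem.Set Int) (result : Int),
    loopA fuel row path cols xySum xyDif n todo result =
      result + (todo.map (fun col =>
        if col ∉ cols ∧ (row + col) ∉ xySum ∧ (row - col) ∉ xyDif then
          dfsA fuel (row + 1) (path ++ [col]) (cols.add col) (xySum.add (row + col)) (xyDif.add (row - col)) n
        else 0)).sum := by
  intro todo
  induction todo with
  | nil => intro cols xySum xyDif result; rw [loopA]; simp
  | cons col rest ih =>
    intro cols xySum xyDif result
    rw [loopA]
    by_cases hok : col ∉ cols ∧ (row + col) ∉ xySum ∧ (row - col) ∉ xyDif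
    · obtain ⟨ha, hbm, hc⟩ := hok
      have e1 : cols.contains col = false :=
        Bool.eq_false_iff.2 (fun h => ha ((PySem.Set.contains_iff _ _).1 h))
      have e2 : xySum.contains (row + col) = false :=
        Bool.eq_false_iff.2 (fun h => hbm ((PySem.Set.contains_iff _ _).1 h))
      have e3 : xyDif.contains (row - col) = false :=
        Bool.eq_false_iff.2 (fun h => hc ((PySem.Set.contains_iff _ _).1 h))
      rw [e1, e2, e3]
      rw [if_pos (by decide)]
      dsimp only
      rw [set_restore ha, set_restore hbm, set_restore hc]
      rw [ih]
      rw [List.map_cons, List.sum_cons, if_pos ⟨ha, hbm, hc⟩]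
      ring
    · have efalse : (!cols.contains col && !xySum.contains (row + col) && !xyDif.contains (row - col)) = false := by
        rcases not_and_or.1 hok with h | h'
        · have e1 : cols.contains col = true := (PySem.Set.contains_iff _ _).2 (not_not.1 h)
          rw [e1]; rfl
        · rcases not_and_or.1 h' with h | h
          · have e2 : xySum.contains (row + col) = true := (PySem.Set.contains_iff _ _).2 (not_not.1 h)
            rw [e2]; simp
          · have e3 : xyDif.contains (row - col) = true := (PySem.Set.contains_iff _ _).2 (not_not.1 h)
            rw [e3]; simp
      rw [efalse]
      rw [if_neg (by simp)]
      rw [ih]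
      rw [List.map_cons, List.sum_cons, if_neg hok]
      ring

-- Lowest-set-bit arithmetic.
theorem lowbit_odd_and (k : Nat) : (2 * k + 1) &&& (2 * k + 1 - 1) = 2 * k := by
  apply Nat.eq_of_testBit_eq
  intro i
  rcases i with _ | i
  · simp only [Nat.testBit_zero]
    have h1 : (2 * k + 1) % 2 = 1 := by omega
    have h3 : (2 * k) % 2 = 0 := by omega
    simp [h1, h3]
  · rw [Nat.testBit_and]
    simp only [Nat.testBit_succ]
    have h1 : (2 * k + 1) / 2 = k := by omega
    have h2 : (2 * k + 1 - 1) / 2 = k := by omega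
    have h0 : (2 * k) / 2 = k := by omega
    rw [h1, h2, h0, Bool.and_self]

theorem lowbit_odd_xor (k : Nat) : (2 * k + 1) ^^^ (2 * k) = 1 := by
  apply Nat.eq_of_testBit_eq
  intro i
  rcases i with _ | i
  · simp only [Nat.testBit_zero]
    have h1 : (2 * k + 1) % 2 = 1 := by omega
    simp [h1]
  · rw [Nat.testBit_xor]
    simp only [Nat.testBit_succ]
    have h1 : (2 * k + 1) / 2 = k := by omega
    have h2 : (2 * k) / 2 = k := by omega
    have h3 : (1 : Nat) / 2 = 0 := by omega
    rw [h1, h2, h3, Bool.xor_self, Nat.zero_testBit]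

theorem and_pred_two_mul (m : Nat) (_h : m ≠ 0) :
    (2 * m) &&& (2 * m - 1) = 2 * (m &&& (m - 1)) := by
  apply Nat.eq_of_testBit_eq
  intro i
  rcases i with _ | i
  · simp only [Nat.testBit_zero]
    have h1 : (2 * m) % 2 = 0 := by omega
    have h2 : (2 * (m &&& (m - 1))) % 2 = 0 := by omega
    simp [h1, h2]
  · rw [Nat.testBit_and]
    simp only [Nat.testBit_succ]
    have h1 : (2 * m) / 2 = m := by omega
    have h2 : (2 * m - 1) / 2 = m - 1 := by omega
    have h3 : (2 * (m &&& (m - 1))) / 2 = m &&& (m - 1) := by omega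
    rw [h1, h2, h3, Nat.testBit_and]

theorem xor_two_mul (a b : Nat) : (2 * a) ^^^ (2 * b) = 2 * (a ^^^ b) := by
  apply Nat.eq_of_testBit_eq
  intro i
  rcases i with _ | i
  · simp only [Nat.testBit_zero]
    have h1 : (2 * a) % 2 = 0 := by omega
    have h3 : (2 * (a ^^^ b)) % 2 = 0 := by omega
    simp [h1, h3]
  · rw [Nat.testBit_xor]
    simp only [Nat.testBit_succ]
    have h1 : (2 * a) / 2 = a := by omega
    have h2 : (2 * b) / 2 = b := by omega
    have h3 : (2 * (a ^^^ b)) / 2 = a ^^^ b := by omega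
    rw [h1, h2, h3, Nat.testBit_xor]

-- Generic lowest-set-bit loop (proof-side abstraction of bitLoopB's shape).
def gloop (g : Nat → Int) (free : Nat) (count : Int) : Int :=
  if _h : free = 0 then count
  else gloop g (free &&& (free - 1)) (count + g (free ^^^ (free &&& (free - 1))))
termination_by free
decreasing_by
  have h1 : free &&& (free - 1) ≤ free - 1 := Nat.and_le_right
  omega

theorem gloop_zero (g : Nat → Int) (count : Int) : gloop g 0 count = count := by
  rw [gloop]; simp

theorem bitLoopB_eq_gloop (fuel : Nat) (row : Int) (colsM dsum ddif full : Nat) (n : Int) :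
    ∀ (free : Nat) (count : Int),
    bitLoopB fuel row colsM dsum ddif full n free count =
      gloop (fun p => dfsB fuel (row + 1) (colsM ||| p) ((dsum ||| p) >>> 1) ((ddif ||| p) <<< 1) full n)
        free count := by
  intro free
  induction free using Nat.strong_induction_on with
  | _ free ih =>
    intro count
    rcases Nat.eq_zero_or_pos free with h0 | h0
    · subst h0
      rw [bitLoopB, gloop_zero]
      simp
    · have hne : free ≠ 0 := by omega
      conv_lhs => rw [bitLoopB]
      conv_rhs => rw [gloop]
      rw [if_neg hne, dif_neg hne]
      have hlt : free &&& (free - 1) < free := by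
        have h1 : free &&& (free - 1) ≤ free - 1 := Nat.and_le_right
        omega
      exact ih _ hlt _

theorem gloop_two_mul (g : Nat → Int) : ∀ (m : Nat) (count : Int),
    gloop g (2 * m) count = gloop (fun p => g (2 * p)) m count := by
  intro m
  induction m using Nat.strong_induction_on with
  | _ m ih =>
    intro count
    rcases Nat.eq_zero_or_pos m with hm | hm
    · subst hm; rw [gloop_zero]; exact (gloop_zero _ _).symm
    · have hm0 : m ≠ 0 := by omega
      have h2m : 2 * m ≠ 0 := by omega
      conv_lhs => rw [gloop]
      conv_rhs => rw [gloop]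
      rw [dif_neg h2m, dif_neg hm0]
      rw [and_pred_two_mul m hm0, xor_two_mul]
      have hlt : m &&& (m - 1) < m := by
        have := Nat.and_le_right (n := m) (m := m - 1); omega
      rw [ih _ hlt]

-- B's loop sums the child counts over the set bits of free (lowest bit first).
theorem gloop_sum (g : Nat → Int) : ∀ (B : Nat) (free : Nat), free < 2 ^ B → ∀ (count : Int),
    gloop g free count =
      count + ((List.range B).map (fun c => if free.testBit c then g (2 ^ c) else 0)).sum := by
  intro B
  induction B generalizing g with
  | zero =>
    intro free hf count
    interval_cases free
    rw [gloop_zero]; simp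
  | succ B ih =>
    intro free hf count
    rcases Nat.eq_zero_or_pos free with h0 | h0
    · subst h0; rw [gloop_zero]; simp
    · rcases Nat.even_or_odd free with ⟨m, hm⟩ | ⟨m, hm⟩
      · have hm' : free = 2 * m := by omega
        subst hm'
        rw [gloop_two_mul]
        have hmB : m < 2 ^ B := by
          have : (2:Nat) ^ (B+1) = 2 * 2 ^ B := by rw [pow_succ]; ring
          omega
        rw [ih _ _ hmB]
        congr 1
        rw [List.range_succ_eq_map, List.map_cons, List.map_map, List.sum_cons]
        have hb0 : (2 * m).testBit 0 = false := by
          simp [Nat.testBit_zero]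
        rw [hb0]
        simp only [if_false, Bool.false_eq_true, zero_add]
        congr 1
        apply List.map_congr_left
        intro c _
        simp only [Function.comp]
        have hbs : (2 * m).testBit (Nat.succ c) = m.testBit c := by
          rw [Nat.testBit_succ]
          congr 1; omega
        rw [hbs]
        have : (2:Nat) ^ Nat.succ c = 2 * 2 ^ c := by rw [pow_succ]; ring
        rw [this]
      · have hm' : free = 2 * m + 1 := by omega
        subst hm'
        rw [gloop]
        simp only [dif_neg (by omega : ¬ (2 * m + 1 = 0))]
        rw [lowbit_odd_and, lowbit_odd_xor]
        rw [gloop_two_mul]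
        have hmB : m < 2 ^ B := by
          have : (2:Nat) ^ (B+1) = 2 * 2 ^ B := by rw [pow_succ]; ring
          omega
        rw [ih _ _ hmB]
        rw [List.range_succ_eq_map, List.map_cons, List.map_map, List.sum_cons]
        have hb0 : (2 * m + 1).testBit 0 = true := by
          simp [Nat.testBit_zero]
        rw [hb0]
        simp only [if_true, pow_zero]
        have hrest : (List.map (fun c => if m.testBit c then g (2 * 2 ^ c) else 0) (List.range B)).sum
            = (List.map ((fun c => if (2*m+1).testBit c then g (2 ^ c) else 0) ∘ Nat.succ) (List.range B)).sum := by
          congr 1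
          apply List.map_congr_left
          intro c _
          simp only [Function.comp]
          have hbs : (2 * m + 1).testBit (Nat.succ c) = m.testBit c := by
            rw [Nat.testBit_succ]
            congr 1; omega
          rw [hbs]
          have : (2:Nat) ^ Nat.succ c = 2 * 2 ^ c := by rw [pow_succ]; ring
          rw [this]
        rw [hrest]
        ring

-- Main correspondence: A with set state equals B with the corresponding mask state.
theorem main_eq (fuel : Nat) : ∀ (row : Int) (path : List Int) (cols xySum xyDif : PySem.Set Int)
    (colsM dsum ddif full : Nat) (n : Int),
    full = (if 0 < n then 2 ^ n.toNat - 1 else 0) →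
    (∀ x : Nat, ((x : Int) ∈ cols ↔ colsM.testBit x)) →
    (∀ x : Nat, ((row + (x : Int)) ∈ xySum ↔ dsum.testBit x)) →
    (∀ x : Nat, ((row - (x : Int)) ∈ xyDif ↔ ddif.testBit x)) →
    (∀ v ∈ xyDif, v < row) →
    dfsA fuel row path cols xySum xyDif n = dfsB fuel row colsM dsum ddif full n := by
  induction fuel with
  | zero =>
    intro row path cols xySum xyDif colsM dsum ddif full n _ _ _ _ _
    rw [dfsA, dfsB]
  | succ fuel ih =>
    intro row path cols xySum xyDif colsM dsum ddif full n hfull hIC hIS hID hIDlt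
    rw [dfsA, dfsB]
    by_cases hr : row = n
    · rw [if_pos hr, if_pos hr]
    rw [if_neg hr, if_neg hr]
    rw [loopA_eq, bitLoopB_eq_gloop]
    have hfull_lt : full < 2 ^ n.toNat := by
      have hpos : 0 < 2 ^ n.toNat := Nat.two_pow_pos _
      rw [hfull]; split <;> omega
    have hfree_le : full ^^^ ((colsM ||| dsum ||| ddif) &&& full) ≤ full := by
      apply Nat.le_of_testBit
      intro i hi
      rw [Nat.testBit_xor, Nat.testBit_and] at hi
      cases hfb : full.testBit i
      · rw [hfb] at hi; simp at hi
      · rfl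
    rw [gloop_sum _ n.toNat _ (by omega)]
    rw [PySem.List.pyRange_one]
    rw [List.map_map]
    rw [show n - (0:Int) = n by ring]
    congr 1
    apply congrArg List.sum
    apply List.map_congr_left
    intro c hc
    have hcn : c < n.toNat := List.mem_range.1 hc
    have hn0 : 0 < n := by omega
    simp only [Function.comp, zero_add]
    have hfullbit : full.testBit c = true := by
      rw [hfull, if_pos hn0, Nat.testBit_two_pow_sub_one]
      simp [hcn]
    have hfreebit : (full ^^^ ((colsM ||| dsum ||| ddif) &&& full)).testBit c
        = !(colsM.testBit c || dsum.testBit c || ddif.testBit c) := by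
      rw [Nat.testBit_xor, Nat.testBit_and, Nat.testBit_or, Nat.testBit_or, hfullbit]
      cases colsM.testBit c <;> cases dsum.testBit c <;> cases ddif.testBit c <;> rfl
    by_cases hok : ((c : Int) ∉ cols ∧ row + (c : Int) ∉ xySum ∧ row - (c : Int) ∉ xyDif)
    · have b1 : colsM.testBit c = false :=
        Bool.eq_false_iff.2 (fun h => hok.1 ((hIC c).2 h))
      have b2 : dsum.testBit c = false :=
        Bool.eq_false_iff.2 (fun h => hok.2.1 ((hIS c).2 h))
      have b3 : ddif.testBit c = false :=
        Bool.eq_false_iff.2 (fun h => hok.2.2 ((hID c).2 h))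
      rw [if_pos hok, hfreebit, b1, b2, b3]
      rw [if_pos (by decide)]
      -- children agree: apply the induction hypothesis with the updated state
      apply ih
      · exact hfull
      · -- columns
        intro x
        rw [PySem.Set.mem_add, Nat.testBit_or, Nat.testBit_two_pow]
        constructor
        · rintro (h | h)
          · simp [(hIC x).1 h]
          · have : c = x := by exact_mod_cast h.symm
            simp [this]
        · intro h
          rw [Bool.or_eq_true] at h
          rcases h with h | h
          · exact Or.inl ((hIC x).2 h)
          · have : c = x := by simpa using h
            exact Or.inr (by exact_mod_cast this.symm)
      · -- sum diagonals, mask shifted right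
        intro x
        rw [PySem.Set.mem_add, Nat.testBit_shiftRight, Nat.testBit_or, Nat.testBit_two_pow]
        have hcast : row + 1 + (x : Int) = row + ((x + 1 : Nat) : Int) := by push_cast; ring
        constructor
        · rintro (h | h)
          · rw [hcast] at h
            have := (hIS (x + 1)).1 h
            simp only [show 1 + x = x + 1 by omega]
            simp [this]
          · have : c = 1 + x := by omega
            simp [this]
        · intro h
          rw [Bool.or_eq_true] at h
          rcases h with h | h
          · left
            rw [hcast]
            exact (hIS (x + 1)).2 (by simpa [show 1 + x = x + 1 by omega] using h)
          · right
            have hcx : c = 1 + x := by simpa using h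
            have : ((c : Int)) = 1 + (x : Int) := by exact_mod_cast hcx
            omega
      · -- difference diagonals, mask shifted left
        intro x
        rw [PySem.Set.mem_add, Nat.testBit_shiftLeft, Nat.testBit_or, Nat.testBit_two_pow]
        rcases x with _ | xs
        · -- x = 0 : both sides false
          simp only [Nat.cast_zero, sub_zero]
          constructor
          · rintro (h | h)
            · exact absurd (hIDlt _ h) (by omega)
            · have hc0 : (0:Int) ≤ (c:Int) := Int.natCast_nonneg c
              omega
          · intro h; simp at h
        · have hd : (decide (Nat.succ xs ≥ 1)) = true := by simp
          rw [hd, Bool.true_and]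
          have hsub : Nat.succ xs - 1 = xs := by omega
          rw [hsub]
          have hcast : row + 1 - ((Nat.succ xs : Nat) : Int) = row - (xs : Int) := by push_cast; ring
          rw [hcast]
          constructor
          · rintro (h | h)
            · simp [(hID xs).1 h]
            · have : c = xs := by omega
              simp [this]
          · intro h
            rw [Bool.or_eq_true] at h
            rcases h with h | h
            · exact Or.inl ((hID xs).2 h)
            · have hcx : c = xs := by simpa using h
              subst hcx
              right; ring
      · -- all xyDif elements stay below the next row
        intro v hv
        rcases (PySem.Set.mem_add _ _ _).1 hv with h | h
        · have := hIDlt v h; omega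
        · have hc0 : (0:Int) ≤ (c:Int) := Int.natCast_nonneg c
          omega
    · -- column not admissible: both contributions are 0
      rw [if_neg hok, hfreebit]
      have hbit : (colsM.testBit c || dsum.testBit c || ddif.testBit c) = true := by
        rcases not_and_or.1 hok with h | h'
        · simp [(hIC c).1 (not_not.1 h)]
        · rcases not_and_or.1 h' with h | h
          · simp [(hIS c).1 (not_not.1 h)]
          · simp [(hID c).1 (not_not.1 h)]
      rw [hbit]
      rw [if_neg (by decide)]
-- ===== VERDICT (by name: the statement is the Claim_ definition above) =====
theorem totalNQueens2_spec : Claim_equal_totalNQueens2 := by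
  intro n _
  unfold Spec_totalNQueens2 totalNQueens2 totalNQueens2_alt
  exact main_eq n.toNat 0 [] _ _ _ 0 0 0 _ n
    (by simp [Nat.shiftLeft_eq])
    (fun x => by simp [PySem.Set.empty, Nat.zero_testBit])
    (fun x => by simp [PySem.Set.empty, Nat.zero_testBit])
    (fun x => by simp [PySem.Set.empty, Nat.zero_testBit])
    (fun v hv => by simp [PySem.Set.empty] at hv)
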